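-- pv_equiv track=rewrite | github.com/cedadev/midas-extract | midas_extract/subsetter.py | tableMatch
-- ===== SOURCE A (Python) =====
-- nameDict = {'STXX': 'SOIL_TEMP_OB', 'SRCC': 'SRC_CAPABILITY', 'GLXX': 'GBL_WX_OB',
--             'SRCE': 'SOURCE', 'TMSL': 'TEMP_MIN_SOIL_OB', 'MRXX': 'MARINE_OB',
--             'ROXX': 'RADT_OB_V2', 'TDXX': 'TEMP_DRNL_OB', 'WDXX': 'WEATHER_DRNL_OB',
--             'RDXX': 'RAIN_DRNL_OB', 'RSXX': 'RAIN_SUBHRLY_OB', 'RHXX': 'RAIN_HRLY_OB',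
--             'WMXX': 'WIND_MEAN_OB', 'WHXX': 'WEATHER_HRLY_OB'}
--
-- def tableMatch(tableName):
--     """
--     Takes what is given and returns a tuple of (tableID, tableName).
--     """
--     if len(tableName) < 5:
--         shortnames = nameDict.keys()
--
--         if tableName in shortnames:
--             longname = nameDict[tableName]
--         elif tableName + "XX" in shortnames:
--             longname = nameDict[tableName + "XX"]
--         else:
--             raise Exception(f"Tablename not known: {tableName}")
--
--         shortname = tableName[:2]
--
--     else:
--         longnames = nameDict.values()
--
--         if tableName not in longnames:
--             raise Exception(f"Tablename not known: {tableName}")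
--         else:
--             for s, l in nameDict.items():
--                 if l == tableName:
--                     shortname = s
--                     break
--             longname = l
--
--     return (shortname[:2], longname)
-- ===== SOURCE B (Python) =====
-- nameDict = {'STXX': 'SOIL_TEMP_OB', 'SRCC': 'SRC_CAPABILITY', 'GLXX': 'GBL_WX_OB',
--             'SRCE': 'SOURCE', 'TMSL': 'TEMP_MIN_SOIL_OB', 'MRXX': 'MARINE_OB',
--             'ROXX': 'RADT_OB_V2', 'TDXX': 'TEMP_DRNL_OB', 'WDXX': 'WEATHER_DRNL_OB',
--             'RDXX': 'RAIN_DRNL_OB', 'RSXX': 'RAIN_SUBHRLY_OB', 'RHXX': 'RAIN_HRLY_OB',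
--             'WMXX': 'WIND_MEAN_OB', 'WHXX': 'WEATHER_HRLY_OB'}
--
-- # One flat index built once: every accepted spelling (4-char key, long name,
-- # and the 2-char prefix of keys ending in 'XX') maps straight to its result tuple.
-- LOOKUP = {}
-- for _k, _v in nameDict.items():
--     _entry = (_k[:2], _v)
--     LOOKUP[_k] = _entry
--     LOOKUP[_v] = _entry
--     if _k.endswith('XX'):
--         LOOKUP[_k[:2]] = _entry
--
--
-- def tableMatch(tableName):
--     """
--     Takes what is given and returns a tuple of (tableID, tableName).
--     """
--     try:
--         return LOOKUP[tableName]
--     except KeyError: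
--         raise Exception(f"Tablename not known: {tableName}")
-- ===== Notes on version B (the rewrite author's own statement) =====
-- stated objective: simpler
-- what changed: Replaces A's length-guarded three-way branch with its key/suffix probes and linear items scan by one module-level index built once (every accepted spelling mapped to its result tuple) and a single dict lookup.
import Mathlib
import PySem

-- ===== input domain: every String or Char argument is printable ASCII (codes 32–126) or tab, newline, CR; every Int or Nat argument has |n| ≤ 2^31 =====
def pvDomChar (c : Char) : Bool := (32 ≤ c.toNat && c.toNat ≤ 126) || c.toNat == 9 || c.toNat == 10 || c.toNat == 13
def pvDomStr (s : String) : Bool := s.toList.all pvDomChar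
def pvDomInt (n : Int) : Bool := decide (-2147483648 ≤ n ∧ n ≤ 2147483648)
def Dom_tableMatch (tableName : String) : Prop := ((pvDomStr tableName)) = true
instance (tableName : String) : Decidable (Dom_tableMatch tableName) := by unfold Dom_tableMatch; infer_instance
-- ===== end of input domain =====

-- B replaces A's length-guarded branches and linear items scan with one precomputed
-- index (every accepted spelling → its result tuple) and a single lookup (objective: simpler).
-- Where the Python raises Exception ("Tablename not known"), both ports return ("",""); those inputs are outside Pre_.

-- shared module constant nameDict
def nameDict : PySem.Dict String String := PySem.Dict.ofList
  [("STXX", "SOIL_TEMP_OB"), ("SRCC", "SRC_CAPABILITY"), ("GLXX", "GBL_WX_OB"),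
   ("SRCE", "SOURCE"), ("TMSL", "TEMP_MIN_SOIL_OB"), ("MRXX", "MARINE_OB"),
   ("ROXX", "RADT_OB_V2"), ("TDXX", "TEMP_DRNL_OB"), ("WDXX", "WEATHER_DRNL_OB"),
   ("RDXX", "RAIN_DRNL_OB"), ("RSXX", "RAIN_SUBHRLY_OB"), ("RHXX", "RAIN_HRLY_OB"),
   ("WMXX", "WIND_MEAN_OB"), ("WHXX", "WEATHER_HRLY_OB")]

-- ===== PORT A =====
def tableMatch (tableName : String) : String × String :=
  if PySem.Str.len tableName < 5 then
    let shortnames := nameDict.keys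
    if shortnames.contains tableName then
      let longname := (nameDict.get? tableName).getD ""
      let shortname := tableName
      (PySem.Str.slice shortname none (some 2), longname)
    else if shortnames.contains (String.ofList (tableName.toList ++ "XX".toList)) then
      let longname := (nameDict.get? (String.ofList (tableName.toList ++ "XX".toList))).getD ""
      let shortname := tableName
      (PySem.Str.slice shortname none (some 2), longname)
    else ("", "")  -- raise Exception(f"Tablename not known: {tableName}") — outside Pre_
  else
    let longnames := nameDict.values
    if !(longnames.contains tableName) then
      ("", "")  -- raise Exception(f"Tablename not known: {tableName}") — outside Pre_
    else
      -- 'for s, l in nameDict.items(): if l == tableName: shortname = s; break' = first match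
      match nameDict.items.find? (fun sl => sl.2 == tableName) with
      | some (s, l) => (PySem.Str.slice s none (some 2), l)
      | none => ("", "")  -- unreachable: tableName ∈ longnames

-- ===== PORT B =====
-- module-level index built once over nameDict.items (Source B's build loop)
def LOOKUP : PySem.Dict String (String × String) :=
  nameDict.items.foldl
    (fun d kv =>
      let entry := (PySem.Str.slice kv.1 none (some 2), kv.2)
      let d := (d.insert kv.1 entry).insert kv.2 entry
      if PySem.Str.endswith kv.1 "XX" then d.insert (PySem.Str.slice kv.1 none (some 2)) entry
      else d)
    PySem.Dict.empty

def tableMatch_alt (tableName : String) : String × String :=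
  match LOOKUP.get? tableName with
  | some e => e
  | none => ("", "")  -- KeyError → raise Exception(f"Tablename not known: {tableName}") — outside Pre_

-- ===== PRECONDITION & SPEC =====
-- Pre_: exactly the spellings the Python accepts (4-char keys, prefixes of keys ending
-- 'XX', and long names); on every other string A raises Exception ("Tablename not known").
def Pre_tableMatch (tableName : String) : Prop :=
  tableName ∈
    ["STXX", "SRCC", "GLXX", "SRCE", "TMSL", "MRXX", "ROXX", "TDXX", "WDXX",
     "RDXX", "RSXX", "RHXX", "WMXX", "WHXX",
     "ST", "GL", "MR", "RO", "TD", "WD", "RD", "RS", "RH", "WM", "WH",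
     "SOIL_TEMP_OB", "SRC_CAPABILITY", "GBL_WX_OB", "SOURCE", "TEMP_MIN_SOIL_OB",
     "MARINE_OB", "RADT_OB_V2", "TEMP_DRNL_OB", "WEATHER_DRNL_OB", "RAIN_DRNL_OB",
     "RAIN_SUBHRLY_OB", "RAIN_HRLY_OB", "WIND_MEAN_OB", "WEATHER_HRLY_OB"]
instance (tableName : String) : Decidable (Pre_tableMatch tableName) := by
  unfold Pre_tableMatch; infer_instance

def pvWitness_tableMatch : String := "ST"

def Spec_tableMatch (tableName : String) (out : String × String) : Prop := out = tableMatch_alt tableName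
instance (tableName : String) (out : String × String) : Decidable (Spec_tableMatch tableName out) := by unfold Spec_tableMatch; infer_instance

-- ===== CLAIM (what is proved, stated in full; the proofs are below) =====
def Claim_equal_tableMatch : Prop := ∀ (tableName : String), Dom_tableMatch tableName → Pre_tableMatch tableName → Spec_tableMatch tableName (tableMatch tableName)

-- ===== LEMMAS AND PROOFS =====
-- The accepted inputs form a finite literal list, so agreement is one kernel computation.
theorem tableMatch_agree_on_pre :
    ∀ t ∈ (["STXX", "SRCC", "GLXX", "SRCE", "TMSL", "MRXX", "ROXX", "TDXX", "WDXX",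
            "RDXX", "RSXX", "RHXX", "WMXX", "WHXX",
            "ST", "GL", "MR", "RO", "TD", "WD", "RD", "RS", "RH", "WM", "WH",
            "SOIL_TEMP_OB", "SRC_CAPABILITY", "GBL_WX_OB", "SOURCE", "TEMP_MIN_SOIL_OB",
            "MARINE_OB", "RADT_OB_V2", "TEMP_DRNL_OB", "WEATHER_DRNL_OB", "RAIN_DRNL_OB",
            "RAIN_SUBHRLY_OB", "RAIN_HRLY_OB", "WIND_MEAN_OB", "WEATHER_HRLY_OB"] : List String),
      tableMatch t = tableMatch_alt t := by
  set_option maxRecDepth 4096 in decide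

-- ===== VERDICT (by name: the statement is the Claim_ definition above) =====
theorem tableMatch_spec : Claim_equal_tableMatch := by
  intro t _ hp
  exact tableMatch_agree_on_pre t hp
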